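-- pv_equiv track=rewrite | github.com/MaxRandle/Python-projects | ProjectEuler1.py | a1
-- ===== SOURCE A (Python) =====
-- def a1(r, a, b, c):
--     """how many numbers from 1 to r are divisible by a, b, or c?"""
--     #|AuBuC| = |A| + |A| + |C| - |AnB| - |AnC| - |BnC| + |AnBnC|
--     A = []
--     B = []
--     C = []
--     AnB = []
--     AnC = []
--     BnC = []
--     AnBnC = []
--     for i in range(1, r+1):
--         if i%a == 0:
--             A += [i]
--         if i%b == 0:
--             B += [i]
--         if i%c == 0:
--             C += [i]
--         if i%(a*b) == 0:
--             AnB += [i]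
--         if i%(a*c) == 0:
--             AnC += [i]
--         if i%(b*c) == 0:
--             BnC += [i]
--         if i%(a*b*c) == 0:
--             AnBnC += [i]
--     return len(A) + len(B) + len(C) - len(AnB) - len(AnC) - len(BnC) + len(AnBnC)
-- ===== SOURCE B (Python) =====
-- def a1(r, a, b, c):
--     """how many numbers from 1 to r are divisible by a, b, or c?"""
--     # closed-form inclusion-exclusion: floor(r/m) counts the multiples of m in 1..r
--     if r < 1:
--         return 0
--     return (r // abs(a) + r // abs(b) + r // abs(c)
--             - r // abs(a * b) - r // abs(a * c) - r // abs(b * c)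
--             + r // abs(a * b * c))
-- ===== Notes on version B (the rewrite author's own statement) =====
-- stated objective: faster
-- what changed: Replaces the O(r) loop that builds seven membership lists with a closed-form inclusion-exclusion of seven floor divisions.
import Mathlib
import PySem

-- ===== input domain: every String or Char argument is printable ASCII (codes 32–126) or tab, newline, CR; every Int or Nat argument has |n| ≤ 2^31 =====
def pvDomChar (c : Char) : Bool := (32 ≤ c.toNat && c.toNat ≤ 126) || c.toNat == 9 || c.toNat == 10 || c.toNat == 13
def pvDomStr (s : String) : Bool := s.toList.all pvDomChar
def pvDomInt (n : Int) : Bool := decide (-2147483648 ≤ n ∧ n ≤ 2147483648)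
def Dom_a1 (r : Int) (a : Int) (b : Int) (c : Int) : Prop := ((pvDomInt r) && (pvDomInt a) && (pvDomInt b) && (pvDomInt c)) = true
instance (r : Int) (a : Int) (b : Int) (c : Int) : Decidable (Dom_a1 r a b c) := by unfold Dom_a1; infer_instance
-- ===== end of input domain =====

-- B replaces A's O(r) loop over seven membership lists with a closed-form
-- inclusion-exclusion of seven floor divisions (objective: faster, asymptotic).

-- ===== PORT A =====
-- state: the seven lists A, B, C, AnB, AnC, BnC, AnBnC
abbrev a1State := List Int × List Int × List Int × List Int × List Int × List Int × List Int

def a1Step (a b c : Int) (st : a1State) (i : Int) : a1State :=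
  ((if PySem.Int.mod i a = 0 then st.1 ++ [i] else st.1),
   (if PySem.Int.mod i b = 0 then st.2.1 ++ [i] else st.2.1),
   (if PySem.Int.mod i c = 0 then st.2.2.1 ++ [i] else st.2.2.1),
   (if PySem.Int.mod i (a*b) = 0 then st.2.2.2.1 ++ [i] else st.2.2.2.1),
   (if PySem.Int.mod i (a*c) = 0 then st.2.2.2.2.1 ++ [i] else st.2.2.2.2.1),
   (if PySem.Int.mod i (b*c) = 0 then st.2.2.2.2.2.1 ++ [i] else st.2.2.2.2.2.1),
   (if PySem.Int.mod i (a*b*c) = 0 then st.2.2.2.2.2.2 ++ [i] else st.2.2.2.2.2.2))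

def a1 (r : Int) (a : Int) (b : Int) (c : Int) : Int :=
  let s := (PySem.List.pyRange 1 (r+1) 1).foldl (a1Step a b c) ([], [], [], [], [], [], [])
  (s.1.length : Int) + s.2.1.length + s.2.2.1.length
    - s.2.2.2.1.length - s.2.2.2.2.1.length - s.2.2.2.2.2.1.length
    + s.2.2.2.2.2.2.length

-- ===== PORT B =====
def a1_alt (r : Int) (a : Int) (b : Int) (c : Int) : Int :=
  if r < 1 then 0
  else PySem.Int.floordiv r |a| + PySem.Int.floordiv r |b| + PySem.Int.floordiv r |c|
       - PySem.Int.floordiv r |a*b| - PySem.Int.floordiv r |a*c| - PySem.Int.floordiv r |b*c|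
       + PySem.Int.floordiv r |a*b*c|

-- ===== PRECONDITION & SPEC =====
-- Pre_ excludes exactly the inputs where A raises ZeroDivisionError:
-- when r ≥ 1 the loop body runs and i % a (etc.) raises if a, b or c is 0.
def Pre_a1 (r : Int) (a : Int) (b : Int) (c : Int) : Prop := r < 1 ∨ (a ≠ 0 ∧ b ≠ 0 ∧ c ≠ 0)
instance (r : Int) (a : Int) (b : Int) (c : Int) : Decidable (Pre_a1 r a b c) := by unfold Pre_a1; infer_instance
def pvWitness_a1 : Int × Int × Int × Int := (30, 3, 5, 7)

def Spec_a1 (r : Int) (a : Int) (b : Int) (c : Int) (out : Int) : Prop := out = a1_alt r a b c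
instance (r : Int) (a : Int) (b : Int) (c : Int) (out : Int) : Decidable (Spec_a1 r a b c out) := by unfold Spec_a1; infer_instance

-- ===== CLAIM (what is proved, stated in full; the proofs are below) =====
def Claim_equal_a1 : Prop := ∀ (r : Int) (a : Int) (b : Int) (c : Int), Dom_a1 r a b c → Pre_a1 r a b c → Spec_a1 r a b c (a1 r a b c)

-- ===== LEMMAS AND PROOFS =====

-- each component of the fold state is the initial list followed by the filtered prefix
lemma a1_fold_filter (a b c : Int) (l : List Int) (st : a1State) :
    l.foldl (a1Step a b c) st =
      (st.1 ++ l.filter (fun i => PySem.Int.mod i a = 0),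
       st.2.1 ++ l.filter (fun i => PySem.Int.mod i b = 0),
       st.2.2.1 ++ l.filter (fun i => PySem.Int.mod i c = 0),
       st.2.2.2.1 ++ l.filter (fun i => PySem.Int.mod i (a*b) = 0),
       st.2.2.2.2.1 ++ l.filter (fun i => PySem.Int.mod i (a*c) = 0),
       st.2.2.2.2.2.1 ++ l.filter (fun i => PySem.Int.mod i (b*c) = 0),
       st.2.2.2.2.2.2 ++ l.filter (fun i => PySem.Int.mod i (a*b*c) = 0)) := by
  induction l generalizing st with
  | nil => simp
  | cons x xs ih =>
      rw [List.foldl_cons, ih]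
      simp only [a1Step, List.filter_cons, Prod.mk.injEq]
      refine ⟨?_, ?_, ?_, ?_, ?_, ?_, ?_⟩ <;> (split <;> simp [*])

-- the number of multiples of m among 1..n is n / |m|
lemma count_multiples (m : Int) (n : Nat) :
    ((PySem.List.pyRange 1 ((n : Int) + 1) 1).filter (fun i => PySem.Int.mod i m = 0)).length
      = n / m.natAbs := by
  induction n with
  | zero => simp [PySem.List.pyRange_one_eq_nil]
  | succ k ih =>
      have h : PySem.List.pyRange 1 ((k : Int) + 1 + 1) 1
          = PySem.List.pyRange 1 ((k : Int) + 1) 1 ++ [(k : Int) + 1] := by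
        have := PySem.List.pyRange_one_succ_right (a := 1) (b := (k : Int) + 1) (by omega)
        simpa using this
      rw [show ((k + 1 : Nat) : Int) + 1 = (k : Int) + 1 + 1 by push_cast; ring, h]
      rw [List.filter_append, List.length_append, ih]
      have hdvd : (PySem.Int.mod ((k : Int) + 1) m = 0) ↔ m.natAbs ∣ (k + 1) := by
        rw [PySem.Int.mod_eq_zero_iff_dvd]
        constructor
        · intro hd
          have : (m.natAbs : Int) ∣ ((k : Int) + 1) := (Int.natAbs_dvd).mpr hd
          exact_mod_cast this
        · intro hd
          have : (m.natAbs : Int) ∣ ((k : Int) + 1) := by exact_mod_cast hd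
          exact (Int.natAbs_dvd).mp this
      rw [Nat.succ_div]
      by_cases hd : m.natAbs ∣ (k + 1)
      · simp [hdvd, hd]
      · simp [hdvd, hd]

-- A's total equals the closed form for r = n ≥ 1
lemma a1_eq_counts (a b c : Int) (n : Nat) :
    a1 (n : Int) a b c =
      ((n / a.natAbs : Nat) : Int) + (n / b.natAbs : Nat) + (n / c.natAbs : Nat)
        - (n / (a*b).natAbs : Nat) - (n / (a*c).natAbs : Nat) - (n / (b*c).natAbs : Nat)
        + (n / (a*b*c).natAbs : Nat) := by
  unfold a1
  rw [a1_fold_filter]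
  simp [count_multiples]

lemma floordiv_abs (m : Int) (n : Nat) :
    PySem.Int.floordiv (n : Int) |m| = ((n / m.natAbs : Nat) : Int) := by
  rw [Int.abs_eq_natAbs]
  exact PySem.Int.floordiv_natCast n m.natAbs

-- ===== VERDICT (by name: the statement is the Claim_ definition above) =====
theorem a1_spec : Claim_equal_a1 := by
  intro r a b c _ _
  unfold Spec_a1 a1_alt
  by_cases hr : r < 1
  · have hnil : PySem.List.pyRange 1 (r+1) 1 = [] :=
      PySem.List.pyRange_one_eq_nil (by omega)
    simp [a1, hnil, hr]
  · obtain ⟨n, hn⟩ : ∃ n : Nat, r = (n : Int) := ⟨r.toNat, by omega⟩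
    rw [if_neg (by omega)]
    rw [hn, a1_eq_counts a b c n]
    rw [floordiv_abs a n, floordiv_abs b n, floordiv_abs c n,
        floordiv_abs (a*b) n, floordiv_abs (a*c) n,
        floordiv_abs (b*c) n, floordiv_abs (a*b*c) n]
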